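-- pv_equiv track=rewrite | github.com/scarletfrank/blog | leetcode/undoc.py | viewBuildStack
-- ===== SOURCE A (Python) =====
-- def viewBuildStack(heights):
--     n = len(heights) #
--     res, stack = [0] * n, []
--     for i in range(n):
--         res[i] = len(stack)
--         if i == 0:
--             stack.append(heights[i]) # 1st
--         elif stack[-1] > heights[i]:
--             stack.append(heights[i]) #
--         else:
--             while stack and stack[-1] < heights[i]:
--                 stack.pop()
--             stack.append(heights[i])
--     return res
-- ===== SOURCE B (Python) =====
-- def viewBuildStack(heights):
--     res = []
--     for i in range(len(heights)):
--         cnt = 0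
--         best = None
--         for j in reversed(range(i)):
--             if best is None or heights[j] >= best:
--                 cnt += 1
--             best = heights[j] if best is None else max(best, heights[j])
--         res.append(cnt)
--     return res
-- ===== Notes on version B (the rewrite author's own statement) =====
-- stated objective: simpler
-- what changed: Replaces A's incremental monotonic stack (with pops and a stack-length snapshot per index) by a direct per-index count: for each i, a backward scan with a running maximum counts the earlier elements that are >= the maximum of everything between them and i; no stack or cross-iteration state is kept.
import Mathlib
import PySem

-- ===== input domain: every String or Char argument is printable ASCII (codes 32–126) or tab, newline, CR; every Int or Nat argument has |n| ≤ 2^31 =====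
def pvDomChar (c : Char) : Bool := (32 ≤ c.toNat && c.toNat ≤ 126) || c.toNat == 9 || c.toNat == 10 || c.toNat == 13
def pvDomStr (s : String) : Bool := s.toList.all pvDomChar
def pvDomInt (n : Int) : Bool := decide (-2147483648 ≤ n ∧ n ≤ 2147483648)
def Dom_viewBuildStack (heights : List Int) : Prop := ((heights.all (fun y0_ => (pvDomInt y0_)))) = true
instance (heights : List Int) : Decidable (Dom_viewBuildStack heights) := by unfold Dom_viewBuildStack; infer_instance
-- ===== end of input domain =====

-- B replaces A's incremental monotonic stack by a direct per-index count of left-visible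
-- elements via a backward running-max scan (simpler per-index formulation; not faster: O(n^2) vs A's O(n)).

-- ===== PORT A =====
-- one iteration of A's loop body; stack is kept head-first (head = Python stack[-1]);
-- the while-pop loop is List.dropWhile, exactly Python's "while stack and stack[-1] < h: stack.pop()"
def stepA (heights : List Int) (st : List Int × List Int) (i : Nat) : List Int × List Int :=
  let res := st.1.set i (st.2.length : Int)   -- res[i] = len(stack)
  let h := heights.getD i 0                   -- heights[i]; i < len(heights), so in range (exact)
  let stack :=
    if i = 0 then
      h :: st.2
    else
      match st.2 with
      | t :: _ => if h < t then h :: st.2     -- stack[-1] > heights[i]: push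
                  else h :: List.dropWhile (fun t => decide (t < h)) st.2
      | [] => h :: List.dropWhile (fun t => decide (t < h)) st.2
        -- Python would raise on stack[-1] here; unreachable (stack is nonempty for i ≥ 1)
  (res, stack)

def viewBuildStack (heights : List Int) : List Int :=
  ((List.range heights.length).foldl (stepA heights) (List.replicate heights.length 0, [])).1

-- ===== PORT B =====
-- one iteration of B's inner loop: (best, cnt); best = None ↦ none
def stepB (heights : List Int) (st : Option Int × Int) (j : Nat) : Option Int × Int :=
  let cnt : Int := match st.1 with
    | none => st.2 + 1
    | some b => if b ≤ heights.getD j 0 then st.2 + 1 else st.2   -- heights[j] >= best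
  let best : Option Int := match st.1 with
    | none => some (heights.getD j 0)
    | some b => some (max b (heights.getD j 0))                   -- max(best, heights[j])
  (best, cnt)

-- the inner loop "for j in reversed(range(i))"
def innerB (heights : List Int) (i : Nat) : Option Int × Int :=
  ((List.range i).reverse).foldl (stepB heights) (none, 0)

def viewBuildStack_alt (heights : List Int) : List Int :=
  (List.range heights.length).map (fun i => (innerB heights i).2)

-- ===== PRECONDITION & SPEC =====
def Spec_viewBuildStack (heights : List Int) (out : List Int) : Prop := out = viewBuildStack_alt heights
instance (heights : List Int) (out : List Int) : Decidable (Spec_viewBuildStack heights out) := by unfold Spec_viewBuildStack; infer_instance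

-- ===== CLAIM (what is proved, stated in full; the proofs are below) =====
def Claim_equal_viewBuildStack : Prop := ∀ (heights : List Int), Dom_viewBuildStack heights → Spec_viewBuildStack heights (viewBuildStack heights)

-- ===== LEMMAS AND PROOFS =====

-- ghost: "index j survives in the stack at time i" (all later heights up to i-1 are ≤ heights[j])
def srv (hs : List Int) (i j : Nat) : Bool :=
  (List.range' (j+1) (i-(j+1))).all (fun k => decide (hs.getD k 0 ≤ hs.getD j 0))

-- ghost: the surviving indices after processing the first m elements, in increasing order
def kp (hs : List Int) (m : Nat) : List Nat := (List.range m).filter (srv hs m)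

-- ghost: A's stack after m iterations (head = top = most recent)
def stk (hs : List Int) (m : Nat) : List Int := ((kp hs m).reverse).map (fun j => hs.getD j 0)

-- ghost: A's res array after m iterations
def resA (hs : List Int) (m : Nat) : List Int :=
  (List.range hs.length).map (fun i => if i < m then ((kp hs i).length : Int) else 0)

-- ghost: max of heights[k..i-1] (none when empty), B's running "best"
def mxw (hs : List Int) (k i : Nat) : Option Int :=
  ((List.range' k (i - k)).map (fun j => hs.getD j 0)).max?

lemma max?_cons_eq (x : Int) (l : List Int) :
    (x :: l).max? = some (match l.max? with | none => x | some b => max x b) := by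
  rw [List.max?_cons]
  cases l.max? <;> rfl

lemma mxw_self (hs : List Int) (i : Nat) : mxw hs i i = none := by
  simp [mxw]

lemma mxw_cons (hs : List Int) (j i : Nat) (h : j < i) :
    mxw hs j i = some (match mxw hs (j+1) i with
                       | none => hs.getD j 0
                       | some b => max (hs.getD j 0) b) := by
  unfold mxw
  have h1 : i - j = (i - (j+1)) + 1 := by omega
  rw [h1, List.range'_succ, List.map_cons, max?_cons_eq]

lemma srv_of_mxw (hs : List Int) (i j : Nat) :
    srv hs i j = (match mxw hs (j+1) i with
                  | none => true
                  | some b => decide (b ≤ hs.getD j 0)) := by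
  unfold srv mxw
  cases hm : ((List.range' (j+1) (i - (j+1))).map (fun k => hs.getD k 0)).max? with
  | none =>
    have : List.range' (j+1) (i - (j+1)) = [] := by
      have := List.max?_eq_none_iff.mp hm
      exact List.map_eq_nil_iff.mp this
    simp [this]
  | some b =>
    have hb := List.max?_eq_some_iff.mp hm
    simp only []
    by_cases hble : b ≤ hs.getD j 0
    · simp only [decide_eq_true hble]
      rw [List.all_eq_true]
      intro k hk
      have hkmem : hs.getD k 0 ∈ (List.range' (j+1) (i - (j+1))).map (fun k => hs.getD k 0) :=
        List.mem_map_of_mem hk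
      exact decide_eq_true (le_trans (hb.2 _ hkmem) hble)
    · simp only [decide_eq_false hble]
      rw [List.all_eq_false]
      obtain ⟨k, hk, hkeq⟩ := List.mem_map.mp hb.1
      refine ⟨k, hk, ?_⟩
      simp only [decide_eq_true_eq]
      exact fun hcontra => hble (hkeq ▸ hcontra)

-- B's inner loop counts the surviving indices
lemma B_inv (hs : List Int) (i : Nat) : ∀ k, k ≤ i → ∀ c : Int,
    ((List.range k).reverse).foldl (stepB hs) (mxw hs k i, c)
      = (mxw hs 0 i, c + ((List.range k).filter (srv hs i)).length) := by
  intro k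
  induction k with
  | zero => intro _ c; simp
  | succ k ih =>
    intro hk c
    have hki : k < i := by omega
    have hstep : stepB hs (mxw hs (k+1) i, c) k
        = (mxw hs k i, c + (if srv hs i k then 1 else 0)) := by
      unfold stepB
      rw [mxw_cons hs k i hki, srv_of_mxw hs i k]
      cases hm : mxw hs (k+1) i with
      | none => simp
      | some b =>
        simp only [Prod.mk.injEq]
        refine ⟨by rw [max_comm], ?_⟩
        split <;> rename_i hb <;> simp only [List.getD_eq_getElem?_getD] at hb <;>
          simp [hb]
    rw [List.range_succ, List.reverse_append, List.reverse_singleton, List.singleton_append,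
        List.foldl_cons, hstep, ih (by omega)]
    rw [List.filter_append]
    by_cases hs' : srv hs i k = true <;> simp [hs', add_comm, add_left_comm]

lemma innerB_eq (hs : List Int) (i : Nat) :
    (innerB hs i).2 = ((kp hs i).length : Int) := by
  unfold innerB kp
  have h0 : (none : Option Int) = mxw hs i i := (mxw_self hs i).symm
  rw [h0, B_inv hs i i le_rfl 0]
  simp

-- A-side step lemmas
lemma srv_succ (hs : List Int) (m j : Nat) (hj : j < m) :
    srv hs (m+1) j = (srv hs m j && decide (hs.getD m 0 ≤ hs.getD j 0)) := by
  unfold srv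
  have h1 : m + 1 - (j+1) = (m - (j+1)) + 1 := by omega
  have h2 : (j+1) + (m - (j+1)) = m := by omega
  rw [h1, List.range'_1_concat, List.all_append, h2]
  simp

lemma srv_self (hs : List Int) (m : Nat) : srv hs (m+1) m = true := by
  simp [srv]

lemma kp_succ (hs : List Int) (m : Nat) :
    kp hs (m+1) = (kp hs m).filter (fun j => decide (hs.getD m 0 ≤ hs.getD j 0)) ++ [m] := by
  unfold kp
  rw [List.range_succ, List.filter_append, List.filter_filter]
  congr 1
  · apply List.filter_congr
    intro j hj
    rw [srv_succ hs m j (List.mem_range.mp hj), Bool.and_comm]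
  · simp [srv_self]

lemma srv_le (hs : List Int) (m a b : Nat) (hab : a < b) (hbm : b < m)
    (hsrv : srv hs m a = true) : hs.getD b 0 ≤ hs.getD a 0 := by
  unfold srv at hsrv
  rw [List.all_eq_true] at hsrv
  have hb : b ∈ List.range' (a+1) (m-(a+1)) := by
    rw [List.mem_range'_1]; omega
  exact of_decide_eq_true (hsrv b hb)

lemma kp_pairwise (hs : List Int) (m : Nat) :
    (kp hs m).Pairwise (fun a b => hs.getD b 0 ≤ hs.getD a 0) := by
  have h1 : (kp hs m).Pairwise (· < ·) := (List.pairwise_lt_range).filter _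
  refine h1.imp_of_mem ?_
  intro a b ha hb hab
  unfold kp at ha hb
  have ha' := List.mem_filter.mp ha
  have hb' := List.mem_filter.mp hb
  exact srv_le hs m a b hab (List.mem_range.mp hb'.1) ha'.2

lemma stk_sorted (hs : List Int) (m : Nat) : (stk hs m).Pairwise (· ≤ ·) := by
  unfold stk
  rw [List.pairwise_map, List.pairwise_reverse]
  exact kp_pairwise hs m

lemma dropWhile_sorted (h : Int) : ∀ l : List Int, l.Pairwise (· ≤ ·) →
    l.dropWhile (fun t => decide (t < h)) = l.filter (fun t => decide (h ≤ t)) := by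
  intro l
  induction l with
  | nil => intro _; rfl
  | cons a l ih =>
    intro hp
    rw [List.pairwise_cons] at hp
    by_cases hah : a < h
    · rw [List.dropWhile_cons_of_pos (by simp [hah]),
          List.filter_cons_of_neg (by simp; omega)]
      exact ih hp.2
    · rw [List.dropWhile_cons_of_neg (by simp [hah]),
          List.filter_cons_of_pos (by simp; omega)]
      rw [List.filter_eq_self.mpr]
      intro x hx
      have := hp.1 x hx
      simp; omega

lemma stk_step (hs : List Int) (m : Nat) :
    hs.getD m 0 :: (stk hs m).dropWhile (fun t => decide (t < hs.getD m 0)) = stk hs (m+1) := by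
  rw [dropWhile_sorted _ _ (stk_sorted hs m)]
  unfold stk
  rw [kp_succ hs m]
  simp only [List.reverse_append, List.reverse_singleton, List.singleton_append, List.map_cons,
    List.filter_reverse, List.filter_map]
  rfl

-- the three branches of A's loop body all compute push-after-pop, i.e. the next stack
lemma stepA_stack (hs : List Int) (m : Nat) :
    (if m = 0 then hs.getD m 0 :: stk hs m
     else
       match stk hs m with
       | t :: _ => if hs.getD m 0 < t then hs.getD m 0 :: stk hs m
                   else hs.getD m 0 :: List.dropWhile (fun t => decide (t < hs.getD m 0)) (stk hs m)
       | [] => hs.getD m 0 :: List.dropWhile (fun t => decide (t < hs.getD m 0)) (stk hs m))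
      = stk hs (m+1) := by
  rw [← stk_step hs m]
  cases m with
  | zero =>
    have h0 : stk hs 0 = [] := by simp [stk, kp]
    simp [h0]
  | succ k =>
    simp only [Nat.succ_ne_zero, if_false]
    cases hst : stk hs (k+1) with
    | nil => rfl
    | cons t rest =>
      dsimp only
      by_cases hlt : hs.getD (k+1) 0 < t
      · rw [if_pos hlt, List.dropWhile_cons_of_neg (by simpa using not_lt.mpr hlt.le)]
      · rw [if_neg hlt]

lemma resA_zero (hs : List Int) : resA hs 0 = List.replicate hs.length 0 := by
  unfold resA
  simp

lemma resA_set (hs : List Int) (m : Nat) (hm : m < hs.length) :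
    (resA hs m).set m ((kp hs m).length : Int) = resA hs (m+1) := by
  unfold resA
  refine List.ext_getElem (by simp) ?_
  intro i h1 h2
  simp only [List.getElem_set, List.getElem_map, List.getElem_range]
  by_cases him : i = m
  · subst him; simp
  · rw [if_neg (fun h => him h.symm)]
    by_cases hi : i < m
    · rw [if_pos hi, if_pos (by omega)]
    · rw [if_neg hi, if_neg (by omega)]

lemma A_inv (hs : List Int) : ∀ m, m ≤ hs.length →
    (List.range m).foldl (stepA hs) (List.replicate hs.length 0, []) = (resA hs m, stk hs m) := by
  intro m
  induction m with
  | zero =>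
    intro _
    rw [resA_zero]
    have : stk hs 0 = [] := by simp [stk, kp]
    simp [this]
  | succ m ih =>
    intro hm
    rw [List.range_succ, List.foldl_append, List.foldl_cons, List.foldl_nil, ih (by omega)]
    show stepA hs (resA hs m, stk hs m) m = _
    unfold stepA
    dsimp only
    have hlen : ((stk hs m).length : Int) = ((kp hs m).length : Int) := by
      simp [stk]
    rw [hlen, resA_set hs m (by omega)]
    exact congrArg _ (stepA_stack hs m)

lemma final_eq (hs : List Int) : viewBuildStack hs = viewBuildStack_alt hs := by
  unfold viewBuildStack viewBuildStack_alt
  rw [A_inv hs hs.length le_rfl]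
  unfold resA
  apply List.map_congr_left
  intro i hi
  rw [if_pos (List.mem_range.mp hi), innerB_eq]

-- ===== VERDICT (by name: the statement is the Claim_ definition above) =====
theorem viewBuildStack_spec : Claim_equal_viewBuildStack := by
  intro heights _
  unfold Spec_viewBuildStack
  exact final_eq heights
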